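-- pv_equiv track=rewrite | github.com/MohitPareek000/devops_project | zero-trust-firewall/backend/app/services/url_analyzer.py | _has_tld_in_subdomain
-- ===== SOURCE A (Python) =====
-- def _has_tld_in_subdomain(subdomain: str) -> bool:
--     """Check if subdomain contains a TLD (e.g., paypal.com.evil.com)."""
--     if not subdomain:
--         return False
--
--     common_tlds = ['com', 'org', 'net', 'co', 'io', 'me', 'us', 'uk', 'edu', 'gov']
--     subdomain_lower = subdomain.lower()
--
--     for tld in common_tlds:
--         if f'.{tld}.' in f'.{subdomain_lower}.' or subdomain_lower.endswith(f'.{tld}'):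
--             return True
--     return False
-- ===== SOURCE B (Python) =====
-- _TLD_SET = {'com', 'org', 'net', 'co', 'io', 'me', 'us', 'uk', 'edu', 'gov'}
--
-- def _has_tld_in_subdomain(subdomain: str) -> bool:
--     """Check if subdomain contains a TLD (e.g., paypal.com.evil.com)."""
--     cur = []
--     for ch in subdomain.lower():
--         if ch == '.':
--             if ''.join(cur) in _TLD_SET:
--                 return True
--             cur = []
--         else:
--             cur.append(ch)
--     return ''.join(cur) in _TLD_SET
-- ===== Notes on version B (the rewrite author's own statement) =====
-- stated objective: alternative
-- what changed: B makes a single character-by-character pass over the lowercased subdomain with a segment accumulator, testing each dot-delimited segment against a constant TLD set, instead of A's loop over the TLD list doing substring scans of a dot-wrapped copy plus a redundant endswith check.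
import Mathlib
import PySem

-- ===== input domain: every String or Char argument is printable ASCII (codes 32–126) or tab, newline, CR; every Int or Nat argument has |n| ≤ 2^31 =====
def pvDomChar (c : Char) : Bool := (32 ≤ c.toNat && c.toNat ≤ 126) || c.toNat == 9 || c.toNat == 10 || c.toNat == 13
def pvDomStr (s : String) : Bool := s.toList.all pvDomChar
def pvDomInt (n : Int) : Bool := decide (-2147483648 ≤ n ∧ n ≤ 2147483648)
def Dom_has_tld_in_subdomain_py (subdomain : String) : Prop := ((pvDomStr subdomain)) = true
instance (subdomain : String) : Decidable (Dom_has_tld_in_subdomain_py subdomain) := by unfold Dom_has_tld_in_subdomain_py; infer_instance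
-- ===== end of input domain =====

-- B makes a single character pass with a segment accumulator, testing each dot-delimited
-- segment against a constant TLD set, instead of A's per-TLD substring scans (objective: alternative).

-- ===== PORT A =====
-- common_tlds = ['com', 'org', 'net', 'co', 'io', 'me', 'us', 'uk', 'edu', 'gov']
def pvCommonTlds : List (List Char) :=
  [['c','o','m'], ['o','r','g'], ['n','e','t'], ['c','o'], ['i','o'],
   ['m','e'], ['u','s'], ['u','k'], ['e','d','u'], ['g','o','v']]

def has_tld_in_subdomain_py (subdomain : String) : Bool :=
  if subdomain.toList.isEmpty then false    -- `if not subdomain: return False`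
  else
    let subdomain_lower := PySem.Chars.lower subdomain.toList
    -- for tld in common_tlds: if f'.{tld}.' in f'.{subdomain_lower}.' or subdomain_lower.endswith(f'.{tld}'): return True
    pvCommonTlds.any (fun tld =>
      PySem.Chars.isIn ('.' :: tld ++ ['.']) ('.' :: subdomain_lower ++ ['.'])
        || PySem.Chars.endswith subdomain_lower ('.' :: tld))

-- ===== PORT B =====
-- _TLD_SET = {'com', 'org', 'net', 'co', 'io', 'me', 'us', 'uk', 'edu', 'gov'}
def pvTldSet : PySem.Set (List Char) :=
  PySem.Set.ofList
    [['c','o','m'], ['o','r','g'], ['n','e','t'], ['c','o'], ['i','o'],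
     ['m','e'], ['u','s'], ['u','k'], ['e','d','u'], ['g','o','v']]

-- the for-loop: `cur` accumulates the current segment in reverse (list append);
-- on '.' the finished segment ''.join(cur) is looked up, after the loop the final one is.
def pvScanSeg : List Char → List Char → Bool
  | acc, [] => PySem.Set.contains pvTldSet acc.reverse
  | acc, c :: rest =>
      if c = '.' then
        if PySem.Set.contains pvTldSet acc.reverse then true else pvScanSeg [] rest
      else pvScanSeg (c :: acc) rest

def has_tld_in_subdomain_py_alt (subdomain : String) : Bool :=
  pvScanSeg [] (PySem.Chars.lower subdomain.toList)

-- ===== PRECONDITION & SPEC =====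
def Spec_has_tld_in_subdomain_py (subdomain : String) (out : Bool) : Prop := out = has_tld_in_subdomain_py_alt subdomain
instance (subdomain : String) (out : Bool) : Decidable (Spec_has_tld_in_subdomain_py subdomain out) := by unfold Spec_has_tld_in_subdomain_py; infer_instance

-- ===== CLAIM (what is proved, stated in full; the proofs are below) =====
def Claim_equal_has_tld_in_subdomain_py : Prop := ∀ (subdomain : String), Dom_has_tld_in_subdomain_py subdomain → Spec_has_tld_in_subdomain_py subdomain (has_tld_in_subdomain_py subdomain)

-- ===== LEMMAS AND PROOFS =====

-- a dot-free word followed by '.' is a prefix of s ++ ['.'] iff it is the first '.'-segment of s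
theorem pv_prefix_head (s : List Char) : ∀ (t : List Char), '.' ∉ t →
    (t ++ ['.'] <+: s ++ ['.'] ↔ (List.splitOn '.' s).head? = some t) := by
  induction s with
  | nil =>
    intro t ht
    cases t with
    | nil => simp [List.splitOn_nil]
    | cons a t' =>
      simp only [List.splitOn_nil, List.cons_append, List.nil_append, List.cons_prefix_cons,
        List.head?_cons, Option.some.injEq]
      constructor
      · rintro ⟨rfl, h⟩; exact absurd (List.mem_cons_self) ht
      · intro h; simp at h
  | cons c s' ih =>
    intro t ht
    have hsplit : List.splitOn '.' (c :: s') =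
        if c = '.' then [] :: List.splitOn '.' s'
        else List.modifyHead (List.cons c) (List.splitOn '.' s') := by
      rw [List.splitOn, List.splitOnP_cons]
      by_cases h : c = '.' <;> simp [h, List.splitOn]
    by_cases hc : c = '.'
    · subst hc
      rw [hsplit, if_pos rfl]
      simp only [List.head?_cons]
      cases t with
      | nil => simp
      | cons a t' =>
        simp only [List.cons_append, List.cons_prefix_cons, Option.some.injEq]
        constructor
        · rintro ⟨rfl, h⟩; exact absurd (List.mem_cons_self) ht
        · intro h; simp at h
    · obtain ⟨h0, rest, hsr⟩ := List.exists_cons_of_ne_nil (List.splitOnP_ne_nil (· == '.') s')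
      rw [hsplit, if_neg hc]
      rw [show List.splitOn '.' s' = h0 :: rest from hsr]
      cases t with
      | nil =>
        simp only [List.nil_append, List.modifyHead, List.head?_cons, Option.some.injEq]
        constructor
        · intro h
          simp only [List.cons_append] at h
          rcases List.cons_prefix_cons.mp h with ⟨h1, -⟩
          exact absurd h1.symm hc
        · intro h; simp at h
      | cons a t' =>
        have ht' : '.' ∉ t' := fun h => ht (List.mem_cons_of_mem _ h)
        have hih := ih t' ht'
        rw [show List.splitOn '.' s' = h0 :: rest from hsr] at hih
        simp only [List.head?_cons, Option.some.injEq] at hih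
        simp only [List.cons_append, List.cons_prefix_cons, List.modifyHead, List.head?_cons,
          Option.some.injEq, List.cons.injEq]
        constructor
        · rintro ⟨rfl, h⟩; exact ⟨rfl, (hih.mp h)⟩
        · rintro ⟨rfl, h⟩; exact ⟨rfl, hih.mpr h⟩

-- '.t.' occurs inside s ++ ['.'] iff t is one of the non-first '.'-segments of s
theorem pv_infix_tail (s : List Char) : ∀ (t : List Char), '.' ∉ t →
    (('.' :: t ++ ['.']) <:+: (s ++ ['.']) ↔ t ∈ (List.splitOn '.' s).tail) := by
  induction s with
  | nil =>
    intro t ht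
    simp only [List.splitOn_nil, List.tail_cons, List.not_mem_nil, iff_false, List.nil_append]
    intro h
    have := h.length_le
    simp at this
  | cons c s' ih =>
    intro t ht
    have hsplit : List.splitOn '.' (c :: s') =
        if c = '.' then [] :: List.splitOn '.' s'
        else List.modifyHead (List.cons c) (List.splitOn '.' s') := by
      rw [List.splitOn, List.splitOnP_cons]
      by_cases h : c = '.' <;> simp [h, List.splitOn]
    simp only [List.cons_append]
    rw [List.infix_cons_iff]
    by_cases hc : c = '.'
    · subst hc
      rw [hsplit, if_pos rfl]
      simp only [List.tail_cons]
      obtain ⟨h0, rest, hsr⟩ := List.exists_cons_of_ne_nil (List.splitOnP_ne_nil (· == '.') s')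
      have hpre := pv_prefix_head s' t ht
      have hih := ih t ht
      rw [show List.splitOn '.' s' = h0 :: rest from hsr] at hpre hih ⊢
      simp only [List.head?_cons, Option.some.injEq] at hpre
      rw [List.mem_cons]
      constructor
      · rintro (h | h)
        · rcases List.cons_prefix_cons.mp h with ⟨-, h2⟩
          exact Or.inl (hpre.mp h2).symm
        · exact Or.inr (hih.mp h)
      · rintro (rfl | h)
        · exact Or.inl (List.cons_prefix_cons.mpr ⟨rfl, hpre.mpr rfl⟩)
        · exact Or.inr (hih.mpr h)
    · obtain ⟨h0, rest, hsr⟩ := List.exists_cons_of_ne_nil (List.splitOnP_ne_nil (· == '.') s')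
      rw [hsplit, if_neg hc]
      have hih := ih t ht
      rw [show List.splitOn '.' s' = h0 :: rest from hsr] at hih ⊢
      simp only [List.modifyHead, List.tail_cons]
      constructor
      · rintro (h | h)
        · rcases List.cons_prefix_cons.mp h with ⟨h1, -⟩
          exact absurd h1.symm hc
        · exact hih.mp h
      · intro h
        exact Or.inr (hih.mpr h)

-- '.t.' occurs in the dot-wrapped string iff t is a '.'-segment of s
theorem pv_wrap_iff_seg (s t : List Char) (ht : '.' ∉ t) :
    (('.' :: t ++ ['.']) <:+: ('.' :: s ++ ['.'])) ↔ t ∈ List.splitOn '.' s := by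
  simp only [List.cons_append]
  rw [List.infix_cons_iff]
  obtain ⟨h0, rest, hsr⟩ := List.exists_cons_of_ne_nil (List.splitOnP_ne_nil (· == '.') s)
  have hpre := pv_prefix_head s t ht
  have htl := pv_infix_tail s t ht
  rw [show List.splitOn '.' s = h0 :: rest from hsr] at hpre htl ⊢
  simp only [List.head?_cons, Option.some.injEq] at hpre
  rw [List.mem_cons, List.tail_cons] at *
  constructor
  · rintro (h | h)
    · rcases List.cons_prefix_cons.mp h with ⟨-, h2⟩
      exact Or.inl (hpre.mp h2).symm
    · exact Or.inr (htl.mp h)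
  · rintro (rfl | h)
    · exact Or.inl (List.cons_prefix_cons.mpr ⟨rfl, hpre.mpr rfl⟩)
    · exact Or.inr (htl.mpr h)

-- the endswith branch is absorbed by the wrapped substring check
theorem pv_endswith_absorbed (s t : List Char) (h : ('.' :: t) <:+ s) :
    ('.' :: t ++ ['.']) <:+: ('.' :: s ++ ['.']) := by
  obtain ⟨p, hp⟩ := h
  exact ⟨'.' :: p, [], by simp [← hp]⟩

-- per-TLD condition of A's loop body equals segment membership
theorem pv_cond_iff (t s : List Char) (ht : '.' ∉ t) :
    (PySem.Chars.isIn ('.' :: t ++ ['.']) ('.' :: s ++ ['.'])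
      || PySem.Chars.endswith s ('.' :: t)) = true ↔ t ∈ List.splitOn '.' s := by
  rw [Bool.or_eq_true, PySem.Chars.isIn_iff_infix, PySem.Chars.endswith_iff]
  constructor
  · rintro (h | h)
    · exact (pv_wrap_iff_seg s t ht).mp h
    · exact (pv_wrap_iff_seg s t ht).mp (pv_endswith_absorbed s t h)
  · intro h
    exact Or.inl ((pv_wrap_iff_seg s t ht).mpr h)

-- B's accumulator scan computes 'some '.'-segment is in the set', where the pending
-- accumulator (reversed) prefixes the first segment of the remaining input
theorem pv_scan_eq_any (s : List Char) : ∀ (acc : List Char),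
    pvScanSeg acc s =
      (List.modifyHead (acc.reverse ++ ·) (List.splitOn '.' s)).any
        (fun p => PySem.Set.contains pvTldSet p) := by
  induction s with
  | nil =>
    intro acc
    simp [pvScanSeg, List.splitOn_nil]
  | cons c rest ih =>
    intro acc
    have hsplit : List.splitOn '.' (c :: rest) =
        if c = '.' then [] :: List.splitOn '.' rest
        else List.modifyHead (List.cons c) (List.splitOn '.' rest) := by
      rw [List.splitOn, List.splitOnP_cons]
      by_cases h : c = '.' <;> simp [h, List.splitOn]
    obtain ⟨h0, rtl, hsr⟩ := List.exists_cons_of_ne_nil (List.splitOnP_ne_nil (· == '.') rest)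
    by_cases hc : c = '.'
    · subst hc
      rw [hsplit, if_pos rfl]
      simp only [pvScanSeg]
      rw [ih []]
      rw [show List.splitOn '.' rest = h0 :: rtl from hsr]
      simp [List.modifyHead]
    · rw [hsplit, if_neg hc]
      simp only [pvScanSeg, if_neg hc]
      rw [ih (c :: acc)]
      rw [show List.splitOn '.' rest = h0 :: rtl from hsr]
      simp

-- ===== VERDICT (by name: the statement is the Claim_ definition above) =====
theorem has_tld_in_subdomain_py_spec : Claim_equal_has_tld_in_subdomain_py := by
  intro subdomain _
  unfold Spec_has_tld_in_subdomain_py has_tld_in_subdomain_py has_tld_in_subdomain_py_alt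
  by_cases hempty : subdomain.toList.isEmpty
  · rw [if_pos hempty]
    rw [List.isEmpty_iff] at hempty
    rw [hempty]
    decide
  · rw [if_neg hempty]
    set s := PySem.Chars.lower subdomain.toList with hs
    rw [pv_scan_eq_any s []]
    obtain ⟨h0, rtl, hsr⟩ := List.exists_cons_of_ne_nil (List.splitOnP_ne_nil (· == '.') s)
    rw [Bool.eq_iff_iff]
    simp only [List.any_eq_true, List.reverse_nil, List.modifyHead, List.nil_append,
      show List.splitOn '.' s = h0 :: rtl from hsr]
    constructor
    · rintro ⟨tld, htld, hcond⟩
      have ht : '.' ∉ tld := by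
        fin_cases htld <;> decide
      have hmem : tld ∈ List.splitOn '.' s := (pv_cond_iff tld s ht).mp hcond
      rw [show List.splitOn '.' s = h0 :: rtl from hsr] at hmem
      refine ⟨tld, hmem, ?_⟩
      rw [PySem.Set.contains_iff]
      have : tld ∈ pvCommonTlds := htld
      fin_cases this <;> decide
    · rintro ⟨part, hpart, hmem⟩
      rw [PySem.Set.contains_iff] at hmem
      have hmem' : part ∈ pvCommonTlds := by
        have : pvTldSet = pvCommonTlds := by decide
        rw [this] at hmem; exact hmem
      have ht : '.' ∉ part := by
        fin_cases hmem' <;> decide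
      have hpart' : part ∈ List.splitOn '.' s := by
        rw [show List.splitOn '.' s = h0 :: rtl from hsr]; exact hpart
      exact ⟨part, hmem', (pv_cond_iff part s ht).mpr hpart'⟩
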